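-- pv_equiv track=rewrite | github.com/dannyregan/banking-app | final-project.py | parseChange
-- ===== SOURCE A (Python) =====
-- def parseChange(coins):
--     total = 0
--     coins = coins.upper()
--     coins = list(coins)
--     for coin in coins:
--         if coin == 'P':
--             total += 1
--         if coin == 'N':
--             total += 5
--         if coin == 'D':
--             total += 10
--         if coin == 'Q':
--             total += 25
--         if coin == 'H':
--             total += 50
--         if coin == 'W':
--             total += 100
--     return total
-- ===== SOURCE B (Python) =====
-- def parseChange(coins):
--     values = {'P': 1, 'N': 5, 'D': 10, 'Q': 25, 'H': 50, 'W': 100}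
--     counts = {}
--     for c in coins.upper():
--         counts[c] = counts.get(c, 0) + 1
--     return sum(counts.get(c, 0) * v for c, v in values.items())
-- ===== Notes on version B (the rewrite author's own statement) =====
-- stated objective: alternative
-- what changed: B builds a frequency table of the uppercased characters in one pass and then computes the total as a weighted sum over the six fixed denominations, instead of A's per-character chain of six if-tests.
import Mathlib
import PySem

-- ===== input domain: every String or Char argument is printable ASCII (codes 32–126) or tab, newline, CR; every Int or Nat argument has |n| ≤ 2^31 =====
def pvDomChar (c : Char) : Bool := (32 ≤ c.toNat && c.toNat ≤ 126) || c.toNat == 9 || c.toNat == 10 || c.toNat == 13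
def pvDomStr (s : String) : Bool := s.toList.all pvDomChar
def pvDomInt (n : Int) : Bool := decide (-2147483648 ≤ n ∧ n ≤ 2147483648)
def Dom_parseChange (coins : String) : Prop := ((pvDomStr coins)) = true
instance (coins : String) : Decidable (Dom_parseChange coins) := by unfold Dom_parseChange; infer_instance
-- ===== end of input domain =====

-- B builds a frequency table of the uppercased characters in one pass, then totals with a
-- weighted sum over the six fixed denominations, instead of A's per-character chain of if-tests.

-- ===== PORT A =====
-- the body of A's for-loop: six successive independent 'if' tests updating total
def parseChangeStep (total : Int) (coin : Char) : Int :=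
  let total := if coin == 'P' then total + 1 else total
  let total := if coin == 'N' then total + 5 else total
  let total := if coin == 'D' then total + 10 else total
  let total := if coin == 'Q' then total + 25 else total
  let total := if coin == 'H' then total + 50 else total
  let total := if coin == 'W' then total + 100 else total
  total

def parseChange (coins : String) : Int :=
  ((PySem.Str.upper coins).toList).foldl parseChangeStep 0

-- ===== PORT B =====
def parseChange_alt (coins : String) : Int :=
  let values : PySem.Dict Char Int :=
    PySem.Dict.ofList [('P', 1), ('N', 5), ('D', 10), ('Q', 25), ('H', 50), ('W', 100)]
  let counts : PySem.Dict Char Int :=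
    ((PySem.Str.upper coins).toList).foldl
      (fun d c => d.insert c (d.getD c 0 + 1)) PySem.Dict.empty
  values.items.foldl (fun acc p => acc + counts.getD p.1 0 * p.2) 0

-- ===== PRECONDITION & SPEC =====
def Spec_parseChange (coins : String) (out : Int) : Prop := out = parseChange_alt coins
instance (coins : String) (out : Int) : Decidable (Spec_parseChange coins out) := by unfold Spec_parseChange; infer_instance

-- ===== CLAIM (what is proved, stated in full; the proofs are below) =====
def Claim_equal_parseChange : Prop := ∀ (coins : String), Dom_parseChange coins → Spec_parseChange coins (parseChange coins)

-- ===== LEMMAS AND PROOFS =====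

-- A's loop computes the weighted sum of the six character counts
theorem parseChange_foldl_count (cs : List Char) (t : Int) :
    cs.foldl parseChangeStep t
    = t + (cs.count 'P') * 1 + (cs.count 'N') * 5 + (cs.count 'D') * 10
        + (cs.count 'Q') * 25 + (cs.count 'H') * 50 + (cs.count 'W') * 100 := by
  induction cs generalizing t with
  | nil => simp
  | cons c cs ih =>
    rw [List.foldl_cons, ih]
    simp only [parseChangeStep, List.count_cons, beq_iff_eq]
    push_cast
    split_ifs <;> ring

-- the literal denominations dict, evaluated
theorem parseChange_values_items :
    (PySem.Dict.ofList [('P', (1 : Int)), ('N', 5), ('D', 10), ('Q', 25), ('H', 50), ('W', 100)]).items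
    = [('P', (1 : Int)), ('N', 5), ('D', 10), ('Q', 25), ('H', 50), ('W', 100)] := by decide

-- ===== VERDICT (by name: the statement is the Claim_ definition above) =====
theorem parseChange_spec : Claim_equal_parseChange := by
  intro coins _
  unfold Spec_parseChange parseChange parseChange_alt
  simp only [PySem.Dict.foldl_insert_getD_add_one_eq_counter, parseChange_values_items,
    List.foldl_cons, List.foldl_nil, PySem.Dict.getD_counter]
  rw [parseChange_foldl_count]
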